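-- pv_equiv track=rewrite | github.com/estraviz/codewars | 7_kyu/2D list by the sequential integers/python/solution.py | make_2d_list
-- ===== SOURCE A (Python) =====
-- def make_2d_list(head, row, col):
--     output = []
--     for _ in range(row):
--         temp = []
--         end = head + col
--         while head < end:
--             temp.append(head)
--             head += 1
--         output.append(temp)
--     return output
-- ===== SOURCE B (Python) =====
-- def make_2d_list(head, row, col):
--     return [[head + r * col + c for c in range(col)] for r in range(row)]
-- ===== Notes on version B (the rewrite author's own statement) =====
-- stated objective: simpler
-- what changed: Replaces the accumulator-threaded nested loops (a running counter mutated across rows by a while loop) with a direct positional formula head + r*col + c computed independently per cell in a nested comprehension.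
import Mathlib
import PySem

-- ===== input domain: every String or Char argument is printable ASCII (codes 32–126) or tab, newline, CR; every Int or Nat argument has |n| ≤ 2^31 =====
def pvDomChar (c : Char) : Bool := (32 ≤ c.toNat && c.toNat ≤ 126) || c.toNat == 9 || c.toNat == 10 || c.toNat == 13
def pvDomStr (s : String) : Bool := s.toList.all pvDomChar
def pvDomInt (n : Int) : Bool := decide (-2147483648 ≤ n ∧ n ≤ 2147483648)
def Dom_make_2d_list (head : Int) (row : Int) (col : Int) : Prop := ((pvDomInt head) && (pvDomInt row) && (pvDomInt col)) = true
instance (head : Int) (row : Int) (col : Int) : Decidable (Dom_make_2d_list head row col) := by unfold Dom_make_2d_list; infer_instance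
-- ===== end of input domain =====

-- B replaces the accumulator-threaded nested loops with an independent per-cell formula head + r*col + c (simpler decomposition, same cost).
-- ===== PORT A =====
def whileTemp (head endv : Int) : List Int × Int :=
  if head < endv then
    let p := whileTemp (head + 1) endv
    (head :: p.1, p.2)
  else ([], head)
termination_by (endv - head).toNat
decreasing_by omega

def make_2d_list (head : Int) (row : Int) (col : Int) : List (List Int) :=
  ((PySem.List.pyRange 0 row 1).foldl
    (fun st _ =>
      let endv := st.2 + col
      let p := whileTemp st.2 endv
      (st.1 ++ [p.1], p.2))
    (([] : List (List Int)), head)).1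

-- ===== PORT B =====
def make_2d_list_alt (head : Int) (row : Int) (col : Int) : List (List Int) :=
  (PySem.List.pyRange 0 row 1).map (fun r =>
    (PySem.List.pyRange 0 col 1).map (fun c => head + r * col + c))

-- ===== PRECONDITION & SPEC =====
def Spec_make_2d_list (head : Int) (row : Int) (col : Int) (out : List (List Int)) : Prop := out = make_2d_list_alt head row col
instance (head : Int) (row : Int) (col : Int) (out : List (List Int)) : Decidable (Spec_make_2d_list head row col out) := by unfold Spec_make_2d_list; infer_instance

-- ===== CLAIM (what is proved, stated in full; the proofs are below) =====
def Claim_equal_make_2d_list : Prop := ∀ (head : Int) (row : Int) (col : Int), Dom_make_2d_list head row col → Spec_make_2d_list head row col (make_2d_list head row col)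

-- ===== LEMMAS AND PROOFS =====


theorem whileTemp_eq_aux : ∀ (n : Nat) (h e : Int), (e - h).toNat = n →
    whileTemp h e = (PySem.List.pyRange h e 1, max h e) := by
  intro n
  induction n with
  | zero =>
    intro h e hn
    rw [whileTemp]
    have hle : e ≤ h := by omega
    simp [not_lt.mpr hle, PySem.List.pyRange_one_eq_nil hle, max_eq_left hle]
  | succ n ih =>
    intro h e hn
    rw [whileTemp]
    have hlt : h < e := by omega
    rw [if_pos hlt, ih (h + 1) e (by omega)]
    rw [PySem.List.pyRange_one_cons hlt]
    simp [max_eq_right (le_of_lt hlt), max_eq_right (by omega : h + 1 ≤ e)]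

theorem whileTemp_eq (h e : Int) : whileTemp h e = (PySem.List.pyRange h e 1, max h e) :=
  whileTemp_eq_aux (e - h).toNat h e rfl

theorem rows_eq (h col r : Int) :
    PySem.List.pyRange (h + r * max col 0) (h + r * max col 0 + col) 1 =
      (PySem.List.pyRange 0 col 1).map (fun c => h + r * col + c) := by
  by_cases hc : col ≤ 0
  · rw [PySem.List.pyRange_one_eq_nil (by omega), PySem.List.pyRange_one_eq_nil (by omega : col ≤ 0)]
    simp
  · rw [PySem.List.pyRange_one, PySem.List.pyRange_one, List.map_map]
    have hm : max col 0 = col := by omega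
    have : (h + r * max col 0 + col - (h + r * max col 0)).toNat = (col - 0).toNat := by omega
    rw [this]
    refine List.map_congr_left ?_
    intro k _
    simp only [Function.comp, hm]
    ring

theorem foldA (col : Int) : ∀ (l : List Int) (acc : List (List Int)) (h : Int),
    (l.foldl
      (fun st _ =>
        let endv := st.2 + col
        let p := whileTemp st.2 endv
        (st.1 ++ [p.1], p.2))
      (acc, h)).1 =
    acc ++ (List.range l.length).map
      (fun (r : Nat) => PySem.List.pyRange (h + (r : Int) * max col 0) (h + (r : Int) * max col 0 + col) 1) := by
  intro l
  induction l with
  | nil => intro acc h; simp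
  | cons x l ih =>
    intro acc h
    have hstep :
        (let endv := (acc, h).2 + col
         let p := whileTemp (acc, h).2 endv
         ((acc, h).1 ++ [p.1], p.2))
        = (acc ++ [PySem.List.pyRange h (h + col) 1], h + max col 0) := by
      simp only [whileTemp_eq]
      have : max h (h + col) = h + max col 0 := by omega
      rw [this]
    rw [List.foldl_cons, hstep, ih]
    rw [List.length_cons, List.range_succ_eq_map]
    rw [List.append_assoc, List.singleton_append]
    simp only [List.map_cons, List.map_map]
    congr 1
    norm_num
    intro k _
    congr 1 <;> push_cast <;> ring

-- ===== VERDICT (by name: the statement is the Claim_ definition above) =====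
theorem make_2d_list_spec : Claim_equal_make_2d_list := by
  intro head row col _
  unfold Spec_make_2d_list make_2d_list make_2d_list_alt
  rw [foldA col (PySem.List.pyRange 0 row 1) [] head]
  rw [List.nil_append, PySem.List.pyRange_one 0 row]
  simp only [List.length_map, List.length_range, List.map_map]
  refine List.map_congr_left ?_
  intro k _
  simp only [Function.comp]
  rw [rows_eq head col (k : Int)]
  refine List.map_congr_left ?_
  intro c _
  ring
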